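-- pv_equiv track=rewrite | github.com/celineFar/PhraseLens | app/search/mwe/phrasal_verbs.py | _find_phrasal_verb_positions
-- ===== SOURCE A (Python) =====
-- def _find_phrasal_verb_positions(
--     passage_lemmas: list[str] | None,
--     search_lemmas: list[str],
--     max_gap: int = 3,
-- ) -> list[int]:
--     """Find positions of phrasal verb components in passage lemmas.
--
--     Allows a gap of up to max_gap tokens between verb and particle
--     to handle separated phrasal verbs (e.g., "turn the lights off").
--     """
--     if not passage_lemmas or not search_lemmas:
--         return []
--
--     positions = []
--     plen = len(passage_lemmas)
--
--     for start in range(plen):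
--         if passage_lemmas[start] == search_lemmas[0]:
--             matched = [start]
--             qi = 1
--             pi = start + 1
--             gap = 0
--             while qi < len(search_lemmas) and pi < plen and gap <= max_gap:
--                 if passage_lemmas[pi] == search_lemmas[qi]:
--                     matched.append(pi)
--                     qi += 1
--                     gap = 0
--                 else:
--                     gap += 1
--                 pi += 1
--
--             if qi == len(search_lemmas):
--                 positions.extend(matched)
--
--     return positions
-- ===== SOURCE B (Python) =====
-- from bisect import bisect_right
--
--
-- def _chain(occ_lists, start, max_gap):
--     """Greedily extend a match chain from `start` through the occurrence
--     lists of the remaining search lemmas; None if the chain breaks."""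
--     prev = start
--     matched = [start]
--     for occ in occ_lists:
--         j = bisect_right(occ, prev)
--         if j < len(occ) and occ[j] <= prev + max_gap + 1:
--             prev = occ[j]
--             matched.append(prev)
--         else:
--             return None
--     return matched
--
--
-- def _find_phrasal_verb_positions(
--     passage_lemmas,
--     search_lemmas,
--     max_gap=3,
-- ):
--     if not passage_lemmas or not search_lemmas:
--         return []
--     cache = {}
--     occs = []
--     for lemma in search_lemmas:
--         if lemma not in cache:
--             cache[lemma] = [i for i, x in enumerate(passage_lemmas) if x == lemma]
--         occs.append(cache[lemma])
--     rest = occs[1:]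
--     positions = []
--     for start in occs[0]:
--         matched = _chain(rest, start, max_gap)
--         if matched is not None:
--             positions.extend(matched)
--     return positions
-- ===== Notes on version B (the rewrite author's own statement) =====
-- stated objective: alternative
-- what changed: B precomputes the sorted occurrence list of each distinct search lemma once (memoized in a dict) and replaces A's token-by-token gap-counting scan with a bisect jump to the first occurrence in the (prev, prev+max_gap+1] window per chain step.
import Mathlib
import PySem

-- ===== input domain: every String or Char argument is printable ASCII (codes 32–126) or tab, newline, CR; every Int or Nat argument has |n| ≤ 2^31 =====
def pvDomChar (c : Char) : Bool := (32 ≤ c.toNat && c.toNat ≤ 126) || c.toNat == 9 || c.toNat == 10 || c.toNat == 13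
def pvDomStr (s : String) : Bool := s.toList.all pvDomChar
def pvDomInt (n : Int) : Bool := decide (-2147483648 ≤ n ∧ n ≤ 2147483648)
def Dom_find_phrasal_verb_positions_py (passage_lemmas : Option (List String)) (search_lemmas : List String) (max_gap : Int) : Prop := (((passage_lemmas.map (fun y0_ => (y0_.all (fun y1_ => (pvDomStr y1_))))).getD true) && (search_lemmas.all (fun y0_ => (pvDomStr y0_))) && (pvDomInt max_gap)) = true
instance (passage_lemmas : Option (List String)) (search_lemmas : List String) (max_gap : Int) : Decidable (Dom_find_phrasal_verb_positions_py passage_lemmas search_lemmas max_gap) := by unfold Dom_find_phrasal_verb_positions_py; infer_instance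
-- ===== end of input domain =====

-- B replaces A's token-by-token gap-counting scan by per-lemma occurrence lists
-- with a bisect jump per chain step (alternative algorithm, same results).

-- ===== PORT A =====
-- A's inner `while` loop; all list indices are in range, so `getD` is exact here.
def pvWhileA (P S : List String) (max_gap : Int) (matched : List Int) (qi pi : Nat) (gap : Int) : List Int × Nat :=
  if _h : qi < S.length ∧ pi < P.length ∧ gap ≤ max_gap then
    if P.getD pi "" == S.getD qi "" then
      pvWhileA P S max_gap (matched ++ [(pi : Int)]) (qi + 1) (pi + 1) 0
    else
      pvWhileA P S max_gap matched qi (pi + 1) (gap + 1)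
  else (matched, qi)
termination_by P.length - pi
decreasing_by all_goals omega

def find_phrasal_verb_positions_py (passage_lemmas : Option (List String)) (search_lemmas : List String) (max_gap : Int) : List Int :=
  match passage_lemmas with
  | none => []
  | some P =>
    if P.isEmpty || search_lemmas.isEmpty then [] else
    (List.range P.length).foldl (fun positions start =>
      if P.getD start "" == search_lemmas.getD 0 "" then
        let r := pvWhileA P search_lemmas max_gap [(start : Int)] 1 (start + 1) 0
        if r.2 = search_lemmas.length then positions ++ r.1 else positions
      else positions) []

-- ===== PORT B =====
-- [i for i, x in enumerate(passage_lemmas) if x == q] (indices in range, getD exact)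
def pvOccList (P : List String) (q : String) : List Int :=
  ((List.range P.length).filter (fun i => P.getD i "" == q)).map (fun (i : Nat) => (i : Int))

-- bisect.bisect_right on a sorted list: number of elements ≤ x
def pvBisectRight (occ : List Int) (x : Int) : Nat :=
  (occ.takeWhile (fun v => decide (v ≤ x))).length

-- Source B's _chain helper
def pvChain (max_gap : Int) : List (List Int) → Int → List Int → Option (List Int)
  | [], _, matched => some matched
  | occ :: rest, prev, matched =>
    match occ[pvBisectRight occ prev]? with
    | some v => if v ≤ prev + max_gap + 1 then pvChain max_gap rest v (matched ++ [v]) else none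
    | none => none

-- Source B's cache loop: each distinct lemma's occurrence list is computed once
def pvBuildOccs (P : List String) : List String → PySem.Dict String (List Int) → List (List Int) → List (List Int)
  | [], _, occs => occs
  | l :: rest, cache, occs =>
    match cache.get? l with
    | some v => pvBuildOccs P rest cache (occs ++ [v])
    | none => pvBuildOccs P rest (cache.insert l (pvOccList P l)) (occs ++ [pvOccList P l])

def find_phrasal_verb_positions_py_alt (passage_lemmas : Option (List String)) (search_lemmas : List String) (max_gap : Int) : List Int :=
  match passage_lemmas with
  | none => []
  | some P =>
    if P.isEmpty || search_lemmas.isEmpty then [] else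
    let occs := pvBuildOccs P search_lemmas PySem.Dict.empty []
    let rest := occs.drop 1
    (occs.headD []).foldl (fun positions start =>
      match pvChain max_gap rest start [start] with
      | some m => positions ++ m
      | none => positions) []

-- ===== PRECONDITION & SPEC =====
def Spec_find_phrasal_verb_positions_py (passage_lemmas : Option (List String)) (search_lemmas : List String) (max_gap : Int) (out : List Int) : Prop := out = find_phrasal_verb_positions_py_alt passage_lemmas search_lemmas max_gap
instance (passage_lemmas : Option (List String)) (search_lemmas : List String) (max_gap : Int) (out : List Int) : Decidable (Spec_find_phrasal_verb_positions_py passage_lemmas search_lemmas max_gap out) := by unfold Spec_find_phrasal_verb_positions_py; infer_instance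

-- ===== CLAIM (what is proved, stated in full; the proofs are below) =====
def Claim_equal_find_phrasal_verb_positions_py : Prop := ∀ (passage_lemmas : Option (List String)) (search_lemmas : List String) (max_gap : Int), Dom_find_phrasal_verb_positions_py passage_lemmas search_lemmas max_gap → Spec_find_phrasal_verb_positions_py passage_lemmas search_lemmas max_gap (find_phrasal_verb_positions_py passage_lemmas search_lemmas max_gap)

-- ===== LEMMAS AND PROOFS =====

-- first index i ≥ pi with P[i] = q
def pvFirstOcc (P : List String) (q : String) (pi : Nat) : Option Nat :=
  if _h : pi < P.length then
    (if P.getD pi "" == q then some pi else pvFirstOcc P q (pi + 1))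
  else none
termination_by P.length - pi
decreasing_by omega

-- A's scan for the next component, extracted
def pvScanA (P : List String) (q : String) (g : Int) (pi : Nat) (gap : Int) : Option Nat :=
  if _h : pi < P.length ∧ gap ≤ g then
    (if P.getD pi "" == q then some pi else pvScanA P q g (pi + 1) (gap + 1))
  else none
termination_by P.length - pi
decreasing_by omega

theorem pvFirstOcc_bounds {P : List String} {q : String} {pi i : Nat}
    (h : pvFirstOcc P q pi = some i) : pi ≤ i ∧ i < P.length := by
  fun_induction pvFirstOcc P q pi with
  | case1 pi hlt hmatch => simp_all
  | case2 pi hlt hmatch ih =>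
    have := ih h; omega
  | case3 pi hlt => simp_all

theorem pvFirstOcc_none {P : List String} {q : String} {pi : Nat}
    (h : P.length ≤ pi) : pvFirstOcc P q pi = none := by
  rw [pvFirstOcc, dif_neg (by omega)]

theorem pvScanA_eq (P : List String) (q : String) (g : Int) (pi : Nat) (gap : Int) :
    pvScanA P q g pi gap =
      (pvFirstOcc P q pi).bind (fun i => if gap + ((i : Int) - (pi : Int)) ≤ g then some i else none) := by
  fun_induction pvScanA P q g pi gap with
  | case1 pi gap hc hmatch =>
    rw [pvFirstOcc, dif_pos hc.1, if_pos hmatch]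
    simp
    omega
  | case2 pi gap hc hmatch ih =>
    rw [pvFirstOcc, dif_pos hc.1, if_neg hmatch, ih]
    cases hfo : pvFirstOcc P q (pi + 1) with
    | none => simp
    | some i =>
      have hb := pvFirstOcc_bounds hfo
      simp only [Option.bind_some]
      have heq : (gap + 1 + ((i : Int) - ((pi : Nat) + 1 : Nat)) ≤ g) ↔ (gap + ((i : Int) - (pi : Int)) ≤ g) := by
        push_cast; omega
      simp only [heq]
  | case3 pi gap hc =>
    cases hfo : pvFirstOcc P q pi with
    | none => simp
    | some i =>
      have hb := pvFirstOcc_bounds hfo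
      rcases Decidable.not_and_iff_or_not.mp hc with h | h
      · exact absurd hb.2 (by omega)
      · simp only [Option.bind_some]
        rw [if_neg (by omega)]

theorem pvWhileA_eq (P S : List String) (g : Int) (qi : Nat) (hq : qi < S.length) :
    ∀ n pi matched gap, P.length - pi = n →
    pvWhileA P S g matched qi pi gap =
      match pvScanA P (S.getD qi "") g pi gap with
      | some i => pvWhileA P S g (matched ++ [(i : Int)]) (qi + 1) (i + 1) 0
      | none => (matched, qi) := by
  intro n
  induction n with
  | zero =>
    intro pi matched gap hn
    rw [pvWhileA, dif_neg (by omega), pvScanA, dif_neg (by omega)]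
  | succ n ih =>
    intro pi matched gap hn
    by_cases hcond : pi < P.length ∧ gap ≤ g
    · rw [pvWhileA, dif_pos ⟨hq, hcond.1, hcond.2⟩, pvScanA, dif_pos hcond]
      by_cases hm : P.getD pi "" == S.getD qi ""
      · rw [if_pos hm, if_pos hm]
      · rw [if_neg hm, if_neg hm, ih (pi + 1) matched (gap + 1) (by omega)]
    · rw [pvWhileA, dif_neg (by tauto), pvScanA, dif_neg hcond]

-- l[(l.takeWhile p).length]? = (l.dropWhile p).head?
theorem pvGetTakeWhile {α : Type} (p : α → Bool) (l : List α) :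
    l[(l.takeWhile p).length]? = (l.dropWhile p).head? := by
  have h2 := List.getElem?_append_right (l₁ := l.takeWhile p) (l₂ := l.dropWhile p)
    (le_refl (l.takeWhile p).length)
  rw [List.takeWhile_append_dropWhile] at h2
  rw [h2]
  simp [List.head?_eq_getElem?]

-- on a strictly increasing list, dropWhile (≤ x) = filter (x <)
theorem pvDropWhileSorted (x : Int) :
    ∀ (l : List Int), l.Pairwise (· < ·) →
    l.dropWhile (fun v => decide (v ≤ x)) = l.filter (fun v => decide (x < v)) := by
  intro l
  induction l with
  | nil => simp
  | cons a t ih =>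
    intro hp
    rw [List.pairwise_cons] at hp
    by_cases h : a ≤ x
    · simp [h, show ¬ (x < a) by omega, ih hp.2]
    · rw [List.dropWhile_cons_of_neg (by simpa using h), List.filter_cons_of_pos (by simp; omega)]
      congr 1
      exact (List.filter_eq_self.mpr (fun b hb => by simp; have := hp.1 b hb; omega)).symm

theorem pvOccList_sorted (P : List String) (q : String) : (pvOccList P q).Pairwise (· < ·) := by
  unfold pvOccList
  rw [List.pairwise_map]
  exact ((List.pairwise_lt_range).filter _).imp (by intro a b h; exact_mod_cast h)

-- head? of the > prev part of range-filter equals pvFirstOcc (prev+1)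
theorem pvHeadFilterA (P : List String) (q : String) (prev : Nat) :
    ∀ m s, s + m = P.length → prev < s →
    (((List.range' s m).filter (fun i => decide (prev < i) && (P.getD i "" == q))).head?) = pvFirstOcc P q s := by
  intro m
  induction m with
  | zero =>
    intro s hs _
    rw [pvFirstOcc_none (show P.length ≤ s by omega)]
    rfl
  | succ m ih =>
    intro s hs hlt
    rw [List.range'_succ, List.filter_cons]
    rw [pvFirstOcc, dif_pos (by omega)]
    by_cases hm : P.getD s "" == q
    · have hm' : P[s]?.getD "" = q := eq_of_beq hm
      simp [hlt, hm']
    · simp only [hm, Bool.and_false, Bool.false_eq_true, not_false_iff, if_neg]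
      exact ih (s + 1) (by omega) (by omega)

theorem pvHeadFilterB (P : List String) (q : String) (prev : Nat) :
    ∀ m s, s + m = P.length → s ≤ prev + 1 →
    (((List.range' s m).filter (fun i => decide (prev < i) && (P.getD i "" == q))).head?) = pvFirstOcc P q (prev + 1) := by
  intro m
  induction m with
  | zero =>
    intro s hs hle
    rw [pvFirstOcc_none (show P.length ≤ prev + 1 by omega)]
    rfl
  | succ m ih =>
    intro s hs hle
    by_cases heq : s = prev + 1
    · subst heq; exact pvHeadFilterA P q prev (m + 1) (prev + 1) hs (by omega)
    · rw [List.range'_succ, List.filter_cons]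
      have : ¬ (prev < s) := by omega
      simp only [this, decide_false, Bool.false_and, Bool.false_eq_true, not_false_iff, if_neg]
      exact ih (s + 1) (by omega) (by omega)

-- the bisect step on pvOccList computes pvFirstOcc (prev+1)
theorem pvBisectStep (P : List String) (q : String) (prev : Nat) :
    (pvOccList P q)[pvBisectRight (pvOccList P q) (prev : Int)]? =
      (pvFirstOcc P q (prev + 1)).map (fun (i : Nat) => (i : Int)) := by
  rw [pvBisectRight, pvGetTakeWhile, pvDropWhileSorted _ _ (pvOccList_sorted P q)]
  unfold pvOccList
  rw [List.filter_map, List.head?_map]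
  congr 1
  have hpred : ∀ i ∈ (List.range P.length).filter (fun i => P.getD i "" == q),
      ((fun v => decide ((prev : Int) < v)) ∘ (fun (i : Nat) => (i : Int))) i = (decide (prev < i) && (P.getD i "" == q)) := by
    intro i hi
    simp only [List.mem_filter] at hi
    rw [hi.2]
    simp
  rw [List.filter_congr hpred, List.filter_filter]
  have hswap : ∀ i ∈ List.range P.length,
      ((decide (prev < i) && (P.getD i "" == q)) && (P.getD i "" == q)) = (decide (prev < i) && (P.getD i "" == q)) := by
    intro i _
    cases h1 : decide (prev < i) <;> cases h2 : (P.getD i "" == q) <;> simp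
  rw [List.filter_congr hswap]
  rw [List.range_eq_range', pvHeadFilterB P q prev P.length 0 (by omega) (by omega)]

-- the cache loop returns exactly the per-lemma occurrence lists
theorem pvBuildOccs_eq (P : List String) :
    ∀ (S : List String) (cache : PySem.Dict String (List Int)) (occs : List (List Int)),
    (∀ l v, cache.get? l = some v → v = pvOccList P l) →
    pvBuildOccs P S cache occs = occs ++ S.map (pvOccList P) := by
  intro S
  induction S with
  | nil => intro cache occs _; simp [pvBuildOccs]
  | cons l rest ih =>
    intro cache occs hinv
    rw [pvBuildOccs]
    cases hc : cache.get? l with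
    | some v =>
      show pvBuildOccs P rest cache (occs ++ [v]) = occs ++ List.map (pvOccList P) (l :: rest)
      rw [ih cache (occs ++ [v]) hinv, hinv l v hc]
      simp
    | none =>
      show pvBuildOccs P rest (cache.insert l (pvOccList P l)) (occs ++ [pvOccList P l]) = occs ++ List.map (pvOccList P) (l :: rest)
      rw [ih (cache.insert l (pvOccList P l)) (occs ++ [pvOccList P l]) ?_]
      · simp
      · intro l' v' hget
        rw [PySem.Dict.get?_insert] at hget
        split_ifs at hget with he
        · cases hget; exact (by rw [he])
        · exact hinv l' v' hget

-- main chain lemma: B's chain over occurrence lists = A's while loop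
theorem pvChainEq (P S : List String) (g : Int) :
    ∀ k qi (prev : Nat) (matched : List Int), S.length - qi = k → qi ≤ S.length →
    pvChain g ((S.drop qi).map (pvOccList P)) (prev : Int) matched =
      (if (pvWhileA P S g matched qi (prev + 1) 0).2 = S.length
       then some (pvWhileA P S g matched qi (prev + 1) 0).1 else none) := by
  intro k
  induction k with
  | zero =>
    intro qi prev matched hk hle
    have hq : qi = S.length := by omega
    rw [List.drop_of_length_le (by omega)]
    rw [pvWhileA.eq_def, dif_neg (by omega)]
    simp [pvChain, hq]
  | succ k ih =>
    intro qi prev matched hk hle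
    have hqlt : qi < S.length := by omega
    rw [List.drop_eq_getElem_cons hqlt, List.map_cons]
    rw [pvWhileA_eq P S g qi hqlt (P.length - (prev + 1)) (prev + 1) matched 0 rfl]
    rw [pvScanA_eq]
    have hgetD : S.getD qi "" = S[qi] := List.getD_eq_getElem S "" hqlt
    rw [hgetD]
    show pvChain g (pvOccList P S[qi] :: (S.drop (qi+1)).map (pvOccList P)) (prev : Int) matched = _
    rw [pvChain, pvBisectStep P S[qi] prev]
    cases hfo : pvFirstOcc P S[qi] (prev + 1) with
    | none =>
      simp only [Option.map_none, Option.bind_none]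
      rw [if_neg (Nat.ne_of_lt hqlt)]
    | some i =>
      have hb := pvFirstOcc_bounds hfo
      simp only [Option.map_some, Option.bind_some]
      by_cases hbound : (i : Int) ≤ (prev : Int) + g + 1
      · have hred : (if 0 + ((i : Int) - ((prev + 1 : Nat) : Int)) ≤ g then some i else none) = some i :=
          if_pos (by push_cast; omega)
        rw [hred, if_pos hbound]
        exact ih (qi + 1) i (matched ++ [(i : Int)]) (by omega) (by omega)
      · have hred : (if 0 + ((i : Int) - ((prev + 1 : Nat) : Int)) ≤ g then some i else none) = (none : Option Nat) :=
          if_neg (by push_cast; omega)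
        rw [hred, if_neg hbound]
        simp [Nat.ne_of_lt hqlt]

-- ===== VERDICT (by name: the statement is the Claim_ definition above) =====
theorem find_phrasal_verb_positions_py_spec : Claim_equal_find_phrasal_verb_positions_py := by
  intro passage_lemmas search_lemmas max_gap _
  unfold Spec_find_phrasal_verb_positions_py
  cases passage_lemmas with
  | none => rfl
  | some P =>
    simp only [find_phrasal_verb_positions_py, find_phrasal_verb_positions_py_alt]
    by_cases hg : P.isEmpty || search_lemmas.isEmpty
    · rw [if_pos hg, if_pos hg]
    · rw [if_neg hg, if_neg hg]
      cases search_lemmas with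
      | nil => simp at hg
      | cons s0 st =>
        rw [pvBuildOccs_eq P (s0 :: st) PySem.Dict.empty []
          (fun l v h => by rw [PySem.Dict.get?_empty] at h; cases h)]
        simp only [List.nil_append, List.map_cons, List.headD_cons, List.drop_succ_cons, List.drop_zero, List.getD_cons_zero]
        rw [PySem.List.foldl_if_eq_foldl_filter (fun start => P.getD start "" == s0)
          (fun positions start =>
            let r := pvWhileA P (s0 :: st) max_gap [(start : Int)] 1 (start + 1) 0
            if r.2 = (s0 :: st).length then positions ++ r.1 else positions)]
        have hocc : pvOccList P s0 = ((List.range P.length).filter (fun i => P.getD i "" == s0)).map (fun (i : Nat) => (i : Int)) := rfl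
        rw [hocc, List.foldl_map]
        apply PySem.List.foldl_congr_mem
        intro acc start hmem
        have hchain := pvChainEq P (s0 :: st) max_gap ((s0 :: st).length - 1) 1 start [(start : Int)] rfl (by simp)
        have hdrop : ((s0 :: st).drop 1).map (pvOccList P) = st.map (pvOccList P) := by simp
        rw [hdrop] at hchain
        simp only at hchain ⊢
        rw [hchain]
        split_ifs with h <;> simp
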